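-- pv_equiv track=rewrite | github.com/Animadversio/DiffusionReasoning | RPM_data_generation/utils_dataset.py | get_r_dict_pos
-- ===== SOURCE A (Python) =====
-- def get_r_dict_pos(r_all):
--     """
--     e.g., r_dict_pos['12'][1]: [ [[0], [0, 1], [1]], ...], rows with num_obj '12' in first 2 panel and 1 in last
--     """
--     r_dict_pos = {}
--     for r_list in r_all:
--         for x in r_list:
--             key = str(len(x[0]))+str(len(x[1]))
--
--             if key not in r_dict_pos.keys():
--                 r_dict_pos[key] = {}
--
--             l = len(x[2])
--             if l not in r_dict_pos[key].keys():
--                 r_dict_pos[key][l] = []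
--
--             r_dict_pos[key][l].append(x)
--     return r_dict_pos
-- ===== SOURCE B (Python) =====
-- def get_r_dict_pos(r_all):
--     """Group-by-key rebuild: flatten once, compute the distinct keys in first-appearance
--     order with dict.fromkeys, then assemble each bucket by filtering (no incremental dict
--     mutation)."""
--     xs = [x for r_list in r_all for x in r_list]
--     okeys = list(dict.fromkeys(str(len(x[0])) + str(len(x[1])) for x in xs))
--     result = {}
--     for ks in okeys:
--         grp = [x for x in xs if str(len(x[0])) + str(len(x[1])) == ks]
--         result[ks] = {l: [x for x in grp if len(x[2]) == l]
--                       for l in dict.fromkeys(len(x[2]) for x in grp)}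
--     return result
-- ===== Notes on version B (the rewrite author's own statement) =====
-- stated objective: alternative
-- what changed: B replaces A's incremental mutation of a nested dict with a group-by rebuild: flatten once, compute the distinct outer/inner keys in first-appearance order via dict.fromkeys, and assemble each bucket with a filter (stability of first-appearance order reproduces A's insertion order exactly).
import Mathlib
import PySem

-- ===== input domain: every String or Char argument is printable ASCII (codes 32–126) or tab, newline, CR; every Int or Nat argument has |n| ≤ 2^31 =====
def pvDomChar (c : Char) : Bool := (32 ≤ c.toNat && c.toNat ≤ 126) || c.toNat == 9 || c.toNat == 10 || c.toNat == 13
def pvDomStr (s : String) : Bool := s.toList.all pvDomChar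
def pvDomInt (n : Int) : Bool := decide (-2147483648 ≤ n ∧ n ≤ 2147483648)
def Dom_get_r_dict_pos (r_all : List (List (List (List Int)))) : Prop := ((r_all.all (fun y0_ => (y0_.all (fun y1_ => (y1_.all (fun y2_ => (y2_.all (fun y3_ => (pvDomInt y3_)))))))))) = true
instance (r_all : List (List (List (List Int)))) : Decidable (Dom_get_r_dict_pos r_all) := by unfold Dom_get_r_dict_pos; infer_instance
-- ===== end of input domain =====

-- B rebuilds the nested grouping by flatten + ordered-distinct-key lists + per-bucket filters,
-- instead of A's incremental mutation of a nested dict (objective: alternative, not faster).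

-- ===== PORT A =====
-- shared key helpers: str(len(x[0]))+str(len(x[1])) and len(x[2]);
-- the total form `(pyGet? …).getD []` is exact under Pre_ (every row has ≥ 3 panels; Python raises IndexError otherwise)
def pvOKey (x : List (List Int)) : String :=
  PySem.Int.toStr (((PySem.List.pyGet? x 0).getD []).length : Int)
    ++ PySem.Int.toStr (((PySem.List.pyGet? x 1).getD []).length : Int)

def pvIKey (x : List (List Int)) : Int :=
  (((PySem.List.pyGet? x 2).getD []).length : Int)

-- the body of A's inner loop, for one row x (Python mutates the inner dict in place;
-- here the updated inner dict is re-inserted, which keeps the key's position)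
def pvStepA (d : PySem.Dict String (PySem.Dict Int (List (List (List Int)))))
    (x : List (List Int)) : PySem.Dict String (PySem.Dict Int (List (List (List Int)))) :=
  let key := pvOKey x
  let d1 := if d.contains key then d else d.insert key PySem.Dict.empty
  let l := pvIKey x
  let inner := d1.getD key PySem.Dict.empty
  let inner1 := if inner.contains l then inner else inner.insert l []
  let lst := inner1.getD l []
  d1.insert key (inner1.insert l (lst ++ [x]))

def get_r_dict_pos (r_all : List (List (List (List Int)))) :
    List (String × List (Int × List (List (List Int)))) :=
  let final := r_all.foldl (fun d r_list => r_list.foldl pvStepA d) PySem.Dict.empty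
  final.items.map (fun p => (p.1, p.2.items))

-- ===== PORT B =====
-- dict.fromkeys = PySem.List.dedup; the two dict comprehensions range over lists of
-- DISTINCT keys, so their association lists are literally these maps
def get_r_dict_pos_alt (r_all : List (List (List (List Int)))) :
    List (String × List (Int × List (List (List Int)))) :=
  let xs := r_all.flatten
  let okeys := PySem.List.dedup (xs.map pvOKey)
  okeys.map (fun ks =>
    let grp := xs.filter (fun x => pvOKey x == ks)
    (ks, (PySem.List.dedup (grp.map pvIKey)).map
          (fun l => (l, grp.filter (fun x => pvIKey x == l)))))

-- ===== PRECONDITION & SPEC =====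
-- A indexes x[0], x[1], x[2] of every row x and raises IndexError on a row with fewer
-- than 3 panels; Pre_ excludes exactly those inputs.
def Pre_get_r_dict_pos (r_all : List (List (List (List Int)))) : Prop :=
  ∀ r_list ∈ r_all, ∀ x ∈ r_list, 3 ≤ x.length
instance (r_all : List (List (List (List Int)))) : Decidable (Pre_get_r_dict_pos r_all) := by
  unfold Pre_get_r_dict_pos; infer_instance

def pvWitness_get_r_dict_pos : List (List (List (List Int))) :=
  [[[[0], [0, 1], [1]], [[2], [0, 1], [0, 1]]]]

def Spec_get_r_dict_pos (r_all : List (List (List (List Int)))) (out : List (String × List (Int × List (List (List Int))))) : Prop := out = get_r_dict_pos_alt r_all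
instance (r_all : List (List (List (List Int)))) (out : List (String × List (Int × List (List (List Int))))) : Decidable (Spec_get_r_dict_pos r_all out) := by unfold Spec_get_r_dict_pos; infer_instance

-- ===== CLAIM (what is proved, stated in full; the proofs are below) =====
def Claim_equal_get_r_dict_pos : Prop := ∀ (r_all : List (List (List (List Int)))), Dom_get_r_dict_pos r_all → Pre_get_r_dict_pos r_all → Spec_get_r_dict_pos r_all (get_r_dict_pos r_all)

-- ===== LEMMAS AND PROOFS =====

-- the per-bucket inner association list B builds
def pvInner (grp : List (List (List Int))) : List (Int × List (List (List Int))) :=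
  (PySem.List.dedup (grp.map pvIKey)).map (fun l => (l, grp.filter (fun x => pvIKey x == l)))

-- the rows of xs in bucket ks
def pvGrp (xs : List (List (List Int))) (ks : String) : List (List (List Int)) :=
  xs.filter (fun x => pvOKey x == ks)

-- the nested dict A's loop reaches after consuming the flattened rows xs
def pvCanon (xs : List (List (List Int))) :
    PySem.Dict String (PySem.Dict Int (List (List (List Int)))) :=
  PySem.Dict.mk ((PySem.List.dedup (xs.map pvOKey)).map
    (fun ks => (ks, PySem.Dict.mk (pvInner (pvGrp xs ks)))))

-- a dict whose items are indexed by an ordered-dedup key list: keys / contains / getD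
lemma pv_mk_dedup_keys {α ν : Type} [BEq α] (l : List α) (g : α → ν) :
    (PySem.Dict.mk ((PySem.List.dedup l).map (fun k => (k, g k)))).keys
      = PySem.List.dedup l := by
  simp [PySem.Dict.keys_mk, List.map_map, Function.comp_def]

lemma pv_mk_dedup_contains {α ν : Type} [BEq α] [LawfulBEq α] (l : List α) (g : α → ν) (k : α) :
    (PySem.Dict.mk ((PySem.List.dedup l).map (fun k => (k, g k)))).contains k = true ↔ k ∈ l := by
  rw [PySem.Dict.contains_iff_mem_keys, pv_mk_dedup_keys, PySem.List.mem_dedup]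

lemma pv_mk_dedup_getD {α ν : Type} [BEq α] [LawfulBEq α] (l : List α) (g : α → ν) (k : α)
    (h : k ∈ l) (d0 : ν) :
    (PySem.Dict.mk ((PySem.List.dedup l).map (fun k => (k, g k)))).getD k d0 = g k := by
  apply PySem.Dict.getD_of_mem_items
  · exact List.mem_map_of_mem ((PySem.List.mem_dedup l k).mpr h)
  · rw [pv_mk_dedup_keys]; exact PySem.List.nodup_dedup l

lemma pv_grp_append_ne (xs : List (List (List Int))) (x : List (List Int)) (ks : String)
    (hne : pvOKey x ≠ ks) : pvGrp (xs ++ [x]) ks = pvGrp xs ks := by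
  simp [pvGrp, List.filter_append, hne]

lemma pv_grp_append_self (xs : List (List (List Int))) (x : List (List Int)) :
    pvGrp (xs ++ [x]) (pvOKey x) = pvGrp xs (pvOKey x) ++ [x] := by
  simp [pvGrp, List.filter_append]

lemma pv_dedup_append_mem {α : Type} [BEq α] [LawfulBEq α] (l : List α) (a : α) (h : a ∈ l) :
    PySem.List.dedup (l ++ [a]) = PySem.List.dedup l := by
  show PySem.Set.ofList (l ++ [a]) = PySem.Set.ofList l
  rw [PySem.Set.ofList_append_singleton,
      PySem.Set.add_of_mem ((PySem.Set.mem_ofList l a).mpr h)]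

lemma pv_dedup_append_not_mem {α : Type} [BEq α] [LawfulBEq α] (l : List α) (a : α) (h : a ∉ l) :
    PySem.List.dedup (l ++ [a]) = PySem.List.dedup l ++ [a] := by
  show PySem.Set.ofList (l ++ [a]) = PySem.Set.ofList l ++ [a]
  rw [PySem.Set.ofList_append_singleton,
      PySem.Set.add_of_not_mem (fun hm => h ((PySem.Set.mem_ofList l a).mp hm))]

lemma pv_inner_append_mem (grp : List (List (List Int))) (x : List (List Int))
    (h : pvIKey x ∈ grp.map pvIKey) :
    pvInner (grp ++ [x]) = (pvInner grp).map (fun p =>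
      if p.1 == pvIKey x
      then (pvIKey x, grp.filter (fun y => pvIKey y == pvIKey x) ++ [x]) else p) := by
  unfold pvInner
  rw [List.map_append, List.map_cons, List.map_nil, pv_dedup_append_mem _ _ h, List.map_map]
  apply List.map_congr_left
  intro l _
  by_cases hl : l = pvIKey x
  · subst hl; simp [List.filter_append]
  · simp [Function.comp, hl, Ne.symm hl, List.filter_append]

lemma pv_inner_append_not_mem (grp : List (List (List Int))) (x : List (List Int))
    (h : pvIKey x ∉ grp.map pvIKey) :
    pvInner (grp ++ [x]) = pvInner grp ++ [(pvIKey x, [x])] := by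
  unfold pvInner
  rw [List.map_append, List.map_cons, List.map_nil, pv_dedup_append_not_mem _ _ h,
      List.map_append, List.map_cons, List.map_nil]
  congr 1
  · apply List.map_congr_left
    intro l hl
    have hne : pvIKey x ≠ l := by
      intro he; exact h (he ▸ (PySem.List.mem_dedup _ _).mp hl)
    simp [List.filter_append, hne]
  · have hnil : grp.filter (fun y => pvIKey y == pvIKey x) = [] :=
      List.filter_eq_nil_iff.mpr (fun a ha hp => h (by
        have he : pvIKey a = pvIKey x := by simpa using hp
        exact he ▸ List.mem_map_of_mem ha))
    simp [List.filter_append, hnil]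

lemma pv_step_canon (xs : List (List (List Int))) (x : List (List Int)) :
    pvStepA (pvCanon xs) x = pvCanon (xs ++ [x]) := by
  by_cases hK : pvOKey x ∈ xs.map pvOKey
  · have hc : (pvCanon xs).contains (pvOKey x) = true :=
      (pv_mk_dedup_contains (xs.map pvOKey) _ _).mpr hK
    have hgetD : (pvCanon xs).getD (pvOKey x) PySem.Dict.empty
        = PySem.Dict.mk (pvInner (pvGrp xs (pvOKey x))) :=
      pv_mk_dedup_getD (xs.map pvOKey) _ _ hK _
    by_cases hL : pvIKey x ∈ (pvGrp xs (pvOKey x)).map pvIKey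
    · -- both keys already present
      have hcL : (PySem.Dict.mk (pvInner (pvGrp xs (pvOKey x)))).contains (pvIKey x) = true :=
        (pv_mk_dedup_contains ((pvGrp xs (pvOKey x)).map pvIKey) _ _).mpr hL
      have hgetDL : (PySem.Dict.mk (pvInner (pvGrp xs (pvOKey x)))).getD (pvIKey x) []
          = (pvGrp xs (pvOKey x)).filter (fun y => pvIKey y == pvIKey x) :=
        pv_mk_dedup_getD ((pvGrp xs (pvOKey x)).map pvIKey) _ _ hL []
      have hstep : pvStepA (pvCanon xs) x
          = (pvCanon xs).insert (pvOKey x)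
              ((PySem.Dict.mk (pvInner (pvGrp xs (pvOKey x)))).insert (pvIKey x)
                ((pvGrp xs (pvOKey x)).filter (fun y => pvIKey y == pvIKey x) ++ [x])) := by
        simp [pvStepA, hc, hgetD, hcL, hgetDL]
      rw [hstep]
      apply PySem.Dict.ext
      rw [PySem.Dict.items_insert_of_contains _ _ hc]
      show List.map _ (((PySem.List.dedup (xs.map pvOKey)).map
          (fun ks => (ks, PySem.Dict.mk (pvInner (pvGrp xs ks)))))) = _
      rw [List.map_map]
      show _ = List.map _ (PySem.List.dedup ((xs ++ [x]).map pvOKey))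
      rw [List.map_append, List.map_cons, List.map_nil, pv_dedup_append_mem _ _ hK]
      apply List.map_congr_left
      intro ks hks
      by_cases hk : ks = pvOKey x
      · subst hk
        simp only [Function.comp, beq_self_eq_true, if_pos]
        refine Prod.ext rfl ?_
        apply PySem.Dict.ext
        rw [PySem.Dict.items_insert_of_contains _ _ hcL]
        show List.map _ (pvInner (pvGrp xs (pvOKey x)))
          = pvInner (pvGrp (xs ++ [x]) (pvOKey x))
        rw [pv_grp_append_self, pv_inner_append_mem _ _ hL]
      · simp only [Function.comp]
        rw [if_neg (by simp [hk]), pv_grp_append_ne _ _ _ (Ne.symm hk)]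
    · -- outer key present, inner key fresh
      have hcL : (PySem.Dict.mk (pvInner (pvGrp xs (pvOKey x)))).contains (pvIKey x) = false := by
        rw [Bool.eq_false_iff]
        intro h
        exact hL ((pv_mk_dedup_contains ((pvGrp xs (pvOKey x)).map pvIKey) _ _).mp h)
      have hstep : pvStepA (pvCanon xs) x
          = (pvCanon xs).insert (pvOKey x)
              ((PySem.Dict.mk (pvInner (pvGrp xs (pvOKey x)))).insert (pvIKey x) [x]) := by
        simp [pvStepA, hc, hgetD, hcL, PySem.Dict.getD_insert_self,
              PySem.Dict.insert_insert_self]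
      rw [hstep]
      apply PySem.Dict.ext
      rw [PySem.Dict.items_insert_of_contains _ _ hc]
      show List.map _ (((PySem.List.dedup (xs.map pvOKey)).map
          (fun ks => (ks, PySem.Dict.mk (pvInner (pvGrp xs ks)))))) = _
      rw [List.map_map]
      show _ = List.map _ (PySem.List.dedup ((xs ++ [x]).map pvOKey))
      rw [List.map_append, List.map_cons, List.map_nil, pv_dedup_append_mem _ _ hK]
      apply List.map_congr_left
      intro ks hks
      by_cases hk : ks = pvOKey x
      · subst hk
        simp only [Function.comp, beq_self_eq_true, if_pos]
        refine Prod.ext rfl ?_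
        apply PySem.Dict.ext
        rw [PySem.Dict.items_insert_of_not_contains _ _ hcL]
        show pvInner (pvGrp xs (pvOKey x)) ++ [(pvIKey x, [x])]
          = pvInner (pvGrp (xs ++ [x]) (pvOKey x))
        rw [pv_grp_append_self, pv_inner_append_not_mem _ _ hL]
      · simp only [Function.comp]
        rw [if_neg (by simp [hk]), pv_grp_append_ne _ _ _ (Ne.symm hk)]
  · -- outer key fresh
    have hc : (pvCanon xs).contains (pvOKey x) = false := by
      rw [Bool.eq_false_iff]
      intro h
      exact hK ((pv_mk_dedup_contains (xs.map pvOKey) _ _).mp h)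
    have hstep : pvStepA (pvCanon xs) x
        = (pvCanon xs).insert (pvOKey x) (PySem.Dict.empty.insert (pvIKey x) [x]) := by
      simp [pvStepA, hc, PySem.Dict.getD_insert_self, PySem.Dict.contains_empty,
            PySem.Dict.insert_insert_self]
    rw [hstep]
    apply PySem.Dict.ext
    rw [PySem.Dict.items_insert_of_not_contains _ _ hc]
    show ((PySem.List.dedup (xs.map pvOKey)).map
        (fun ks => (ks, PySem.Dict.mk (pvInner (pvGrp xs ks))))) ++ _ = _
    show _ = List.map _ (PySem.List.dedup ((xs ++ [x]).map pvOKey))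
    rw [List.map_append, List.map_cons, List.map_nil, pv_dedup_append_not_mem _ _ hK,
        List.map_append, List.map_cons, List.map_nil]
    congr 1
    · apply List.map_congr_left
      intro ks hks
      have hne : pvOKey x ≠ ks := by
        intro he
        exact hK (he ▸ (PySem.List.mem_dedup _ _).mp hks)
      rw [pv_grp_append_ne _ _ _ hne]
    · have hnil : pvGrp xs (pvOKey x) = [] :=
        List.filter_eq_nil_iff.mpr (fun a ha hp => hK (by
          have : pvOKey a = pvOKey x := by simpa using hp
          exact this ▸ List.mem_map_of_mem ha))
      rw [pv_grp_append_self, hnil, List.nil_append]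
      refine congrArg (fun d => [(pvOKey x, d)]) ?_
      apply PySem.Dict.ext
      rw [PySem.Dict.items_insert_of_not_contains _ _ (PySem.Dict.contains_empty _)]
      show [] ++ [(pvIKey x, [x])] = pvInner [x]
      simp [pvInner, PySem.List.dedup, PySem.Set.ofList, PySem.Set.empty, PySem.Set.add,
            List.filter]

lemma pv_foldl_canon (xs : List (List (List Int))) :
    xs.foldl pvStepA PySem.Dict.empty = pvCanon xs := by
  induction xs using List.reverseRecOn with
  | nil => rfl
  | append_singleton xs x ih => rw [List.foldl_append, List.foldl_cons, List.foldl_nil, ih, pv_step_canon]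

-- ===== VERDICT (by name: the statement is the Claim_ definition above) =====
theorem get_r_dict_pos_spec : Claim_equal_get_r_dict_pos := by
  intro r_all _ _
  unfold Spec_get_r_dict_pos get_r_dict_pos get_r_dict_pos_alt
  rw [show (fun d r_list => List.foldl pvStepA d r_list) = fun d r_list => List.foldl pvStepA d r_list from rfl,
      ← List.foldl_flatten, pv_foldl_canon]
  simp [pvCanon, pvInner, pvGrp, List.map_map, Function.comp]
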